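-- pv_equiv track=rewrite | github.com/jaimejaramilloarias/GeneradorMontunos | GeneradorMontunos/midi_utils.py | _ajustar_salto
-- ===== SOURCE A (Python) =====
-- from typing import Dict, List, Optional, Tuple
--
-- def _ajustar_salto(prev_pitch: Optional[int], pitch: int) -> int:
--     """Return ``pitch`` transposed by octaves so the leap from ``prev_pitch``
--     is less than an octave."""
--
--     if prev_pitch is None:
--         return pitch
--     while pitch - prev_pitch >= 12:
--         pitch -= 12
--     while prev_pitch - pitch >= 12:
--         pitch += 12
--     return pitch
-- ===== SOURCE B (Python) =====
-- def _ajustar_salto(prev_pitch, pitch):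
--     if prev_pitch is None:
--         return pitch
--     d = pitch - prev_pitch
--     q = abs(d) // 12
--     return pitch - 12 * q if d >= 0 else pitch + 12 * q
-- ===== Notes on version B (the rewrite author's own statement) =====
-- stated objective: simpler
-- what changed: Replaced the two subtract/add-12 while-loops by a single closed-form octave count q = |d| // 12 applied with the sign of d (truncation toward zero).
import Mathlib
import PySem

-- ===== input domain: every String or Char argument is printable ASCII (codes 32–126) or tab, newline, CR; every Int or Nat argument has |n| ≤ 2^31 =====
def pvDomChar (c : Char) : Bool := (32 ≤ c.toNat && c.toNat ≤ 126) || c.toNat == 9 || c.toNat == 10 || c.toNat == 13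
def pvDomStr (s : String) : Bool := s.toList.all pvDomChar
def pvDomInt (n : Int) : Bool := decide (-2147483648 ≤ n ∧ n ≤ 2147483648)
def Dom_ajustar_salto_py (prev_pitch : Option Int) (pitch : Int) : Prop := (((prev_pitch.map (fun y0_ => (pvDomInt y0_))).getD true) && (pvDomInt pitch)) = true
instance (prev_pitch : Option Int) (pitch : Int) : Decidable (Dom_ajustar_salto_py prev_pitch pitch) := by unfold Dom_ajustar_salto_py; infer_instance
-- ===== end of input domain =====

-- B replaces the two subtract/add-12 while-loops by one closed-form octave count |d| // 12 applied with the sign of d (objective: simpler).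

-- ===== PORT A =====
-- 'while pitch - prev_pitch >= 12: pitch -= 12'
def pvLoopDown (prev pitch : Int) : Int :=
  if pitch - prev ≥ 12 then pvLoopDown prev (pitch - 12) else pitch
termination_by (pitch - prev).toNat
decreasing_by omega

-- 'while prev_pitch - pitch >= 12: pitch += 12'
def pvLoopUp (prev pitch : Int) : Int :=
  if prev - pitch ≥ 12 then pvLoopUp prev (pitch + 12) else pitch
termination_by (prev - pitch).toNat
decreasing_by omega

def ajustar_salto_py (prev_pitch : Option Int) (pitch : Int) : Int :=
  match prev_pitch with
  | none => pitch
  | some prev => pvLoopUp prev (pvLoopDown prev pitch)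

-- ===== PORT B =====
def ajustar_salto_py_alt (prev_pitch : Option Int) (pitch : Int) : Int :=
  match prev_pitch with
  | none => pitch
  | some prev =>
    let d := pitch - prev
    let q := PySem.Int.floordiv |d| 12
    if d ≥ 0 then pitch - 12 * q else pitch + 12 * q

-- ===== PRECONDITION & SPEC =====
def Spec_ajustar_salto_py (prev_pitch : Option Int) (pitch : Int) (out : Int) : Prop := out = ajustar_salto_py_alt prev_pitch pitch
instance (prev_pitch : Option Int) (pitch : Int) (out : Int) : Decidable (Spec_ajustar_salto_py prev_pitch pitch out) := by unfold Spec_ajustar_salto_py; infer_instance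

-- ===== CLAIM (what is proved, stated in full; the proofs are below) =====
def Claim_equal_ajustar_salto_py : Prop := ∀ (prev_pitch : Option Int) (pitch : Int), Dom_ajustar_salto_py prev_pitch pitch → Spec_ajustar_salto_py prev_pitch pitch (ajustar_salto_py prev_pitch pitch)

-- ===== LEMMAS AND PROOFS =====
theorem pvLoopDown_spec (prev pitch : Int) (h : 0 ≤ pitch - prev) :
    pvLoopDown prev pitch = pitch - 12 * ((pitch - prev) / 12) := by
  fun_induction pvLoopDown prev pitch with
  | case1 pitch h12 ih =>
    rw [ih (by omega)]; omega
  | case2 pitch h12 => omega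

theorem pvLoopDown_noop (prev pitch : Int) (h : pitch - prev < 12) :
    pvLoopDown prev pitch = pitch := by
  unfold pvLoopDown
  simp [show ¬ pitch - prev ≥ 12 by omega]

theorem pvLoopUp_noop (prev pitch : Int) (h : prev - pitch < 12) :
    pvLoopUp prev pitch = pitch := by
  unfold pvLoopUp
  simp [show ¬ prev - pitch ≥ 12 by omega]

theorem pvLoopUp_spec (prev pitch : Int) (h : 0 ≤ prev - pitch) :
    pvLoopUp prev pitch = pitch + 12 * ((prev - pitch) / 12) := by
  fun_induction pvLoopUp prev pitch with
  | case1 pitch h12 ih =>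
    rw [ih (by omega)]; omega
  | case2 pitch h12 => omega

-- ===== VERDICT (by name: the statement is the Claim_ definition above) =====
theorem ajustar_salto_py_spec : Claim_equal_ajustar_salto_py := by
  intro prev_pitch pitch _
  unfold Spec_ajustar_salto_py
  cases prev_pitch with
  | none => rfl
  | some prev =>
    simp only [ajustar_salto_py, ajustar_salto_py_alt]
    rw [PySem.Int.floordiv_eq_ediv_of_pos (by omega)]
    by_cases hd : pitch - prev ≥ 0
    · rw [pvLoopDown_spec prev pitch (by omega)]
      rw [pvLoopUp_noop _ _ (by omega)]
      simp [abs_of_nonneg hd]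
      omega
    · rw [pvLoopDown_noop prev pitch (by omega)]
      rw [pvLoopUp_spec prev pitch (by omega)]
      simp only [hd, if_false, abs_of_neg (by omega : pitch - prev < 0)]
      omega
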